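-- pv_equiv track=rewrite | github.com/leh60245/codetree-TILs | 241012/팩맨/pacman.py | mv_pickman
-- ===== SOURCE A (Python) =====
-- ARRLEN = 4
--
-- gost_arr = [[0] * ARRLEN for _ in range(ARRLEN)]  # 격자위 고스트 마리 수
--
-- gost_info = list()  # r, c, d 저장
--
-- dead_arr = [[0] * ARRLEN for _ in range(ARRLEN)]  # 시체 표기
--
-- def in_box(i, j):
--     return 0 <= i < ARRLEN and 0 <= j < ARRLEN
--
-- def mv_pickman(ci, cj, gost_arr, gost_info, dead_arr):
--     # [3] 픽맨 이동
--     # 총 3칸을 이동한다. ******각 이동마다 상좌하우 선택지를 가진다.****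
--     # 따라서 64개의 이동 방법이 존재하는데, 이 중 몬스터를 가장 많이 먹을 수 잇는 방향으로 움직인다. -> 완전 탐색
--     # 많이 먹을 수 있는 방법이 여러개라면, 상-좌-하-우 우선순위를 가진다. 상상상-상상좌-상상하-상상우-상좌상-상좌좌-...
--     # 이동하는 과정에 격자 밖을 나가는 경우는 고려하지 않는다.
--     # 이동하는 과정에서 이동하는 칸에 있는 몬스터는 모두 먹고, 그 자리에 몬스터 시체를 남긴다. -> 벽(몬스터에게만 해당)
--     # 단, 픽맨은 알은 먹지 않으며, 움직이기 전에 함께 있었던 몬스터도 먹지 않는다.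
--     #   **********즉 이동하는 과정에 있는 몬스터만 먹는다. **********
--     max_eat = -1  # 정말 만약에라도 먹을 고스트가 없다면, 움직이긴 해야 하니까...
--     path = list()
--     for fdi, fdj in [(-1, 0), (0, -1), (1, 0), (0, 1)]:
--         fni, fnj = ci + fdi, cj + fdj
--         if not in_box(fni, fnj) or (fni, fnj) == (ci, cj):
--             continue
--         for sdi, sdj in [(-1, 0), (0, -1), (1, 0), (0, 1)]:
--             sni, snj = ci + fdi + sdi, cj + fdj + sdj
--             if not in_box(sni, snj) or (sni, snj) == (fni, fnj) or (sni, snj) == (ci, cj):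
--                 continue
--             for tdi, tdj in [(-1, 0), (0, -1), (1, 0), (0, 1)]:
--                 tni, tnj = ci + fdi + sdi + tdi, cj + fdj + sdj + tdj
--                 if not in_box(tni, tnj) or (tni, tnj) == (sni, snj) or (tni, tnj) == (fni, fnj) or (tni, tnj) == (
--                 ci, cj):
--                     continue
--                 eat = gost_arr[fni][fnj] + gost_arr[sni][snj] + gost_arr[tni][tnj]
--                 if max_eat < eat:
--                     max_eat = eat
--                     path = [(fni, fnj), (sni, snj), (tni, tnj)]
--
--     # 정말 만약에라도 먹을 고스트가 없다면, 위위위로 올라가야한다.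
--
--     # 경로상의 몬스터 죽이기
--     new_gost_info = []
--     for gi, gj, gd in gost_info:
--         if (gi, gj) in path:
--             gost_arr[gi][gj] -= 1
--             dead_arr[gi][gj] = 3
--         else:
--             new_gost_info.append((gi, gj, gd))
--
--     after_R, after_C = path[-1]
--     return after_R, after_C, gost_arr, new_gost_info, dead_arr
-- ===== SOURCE B (Python) =====
-- ARRLEN = 4
--
-- def mv_pickman(ci, cj, gost_arr, gost_info, dead_arr):
--     # Phase 1: build every valid 3-step path by DFS (directions tried in the
--     # up-left-down-right priority order), then take the first best candidate.
--     cands = []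
--     def dfs(i, j, seen, acc, eaten, depth):
--         if depth == 3:
--             cands.append((eaten, acc))
--             return
--         for di, dj in ((-1, 0), (0, -1), (1, 0), (0, 1)):
--             ni, nj = i + di, j + dj
--             if 0 <= ni < ARRLEN and 0 <= nj < ARRLEN and (ni, nj) not in seen:
--                 dfs(ni, nj, seen + [(ni, nj)], acc + [(ni, nj)],
--                     eaten + gost_arr[ni][nj], depth + 1)
--     dfs(ci, cj, [(ci, cj)], [], 0, 0)
--     _, path = max(cands, key=lambda c: c[0])  # max keeps the first maximal candidate
--     # Phase 2: kill the monsters on the chosen path (one linear pass).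
--     new_gost_info = []
--     for gi, gj, gd in gost_info:
--         if (gi, gj) in path:
--             gost_arr[gi][gj] -= 1
--             dead_arr[gi][gj] = 3
--         else:
--             new_gost_info.append((gi, gj, gd))
--     after_R, after_C = path[-1]
--     return after_R, after_C, gost_arr, new_gost_info, dead_arr
-- ===== Notes on version B (the rewrite author's own statement) =====
-- stated objective: alternative
-- what changed: Phase 1's three hand-unrolled nested direction loops with a running (max_eat, path) best are replaced by a recursive DFS that collects every valid 3-step path with its eaten total and a single max(key=eaten) first-maximum selection; the monster-killing pass is kept.
import Mathlib
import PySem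

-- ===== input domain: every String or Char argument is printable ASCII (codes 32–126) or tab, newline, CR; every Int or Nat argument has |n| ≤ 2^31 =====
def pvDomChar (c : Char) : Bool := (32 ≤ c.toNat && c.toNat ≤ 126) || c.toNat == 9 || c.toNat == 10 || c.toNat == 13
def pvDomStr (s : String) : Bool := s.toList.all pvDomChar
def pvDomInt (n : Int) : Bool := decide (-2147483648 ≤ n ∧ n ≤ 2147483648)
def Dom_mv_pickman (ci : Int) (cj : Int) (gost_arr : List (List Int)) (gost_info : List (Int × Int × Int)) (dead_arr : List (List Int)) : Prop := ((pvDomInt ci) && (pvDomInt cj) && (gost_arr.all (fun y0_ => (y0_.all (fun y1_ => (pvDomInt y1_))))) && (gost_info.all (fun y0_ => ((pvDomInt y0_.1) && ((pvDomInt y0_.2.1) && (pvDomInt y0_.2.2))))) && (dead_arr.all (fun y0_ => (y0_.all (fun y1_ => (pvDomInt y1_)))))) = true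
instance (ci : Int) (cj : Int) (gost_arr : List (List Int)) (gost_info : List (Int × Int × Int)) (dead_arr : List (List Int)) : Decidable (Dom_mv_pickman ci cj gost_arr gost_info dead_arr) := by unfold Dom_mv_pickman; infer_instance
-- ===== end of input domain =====

-- B replaces A's three hand-unrolled nested direction loops (with a running best) by a
-- recursive DFS that enumerates all valid 3-step paths and a single first-maximum selection;
-- the monster-killing pass is kept. Both Pythons mutate gost_arr/dead_arr in place in the
-- same way; the equivalence proved here is about the returned value.


-- ===== PORT A =====
-- helpers shared by both ports (the two Pythons share these pieces verbatim)
def pvDirs : List (Int × Int) := [(-1, 0), (0, -1), (1, 0), (0, 1)]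

def pvInBox (i j : Int) : Bool := decide (0 ≤ i ∧ i < 4 ∧ 0 ≤ j ∧ j < 4)

-- gost_arr[i][j]; exact where both indexes are in range (Pre_ guarantees every reached access is)
def pvIdx2 (g : List (List Int)) (i j : Int) : Int :=
  ((PySem.List.pyGet? g i).bind fun r => PySem.List.pyGet? r j).getD 0

-- m[i][j] = f(m[i][j]); only reached with (i,j) in the 4×4 box and rows long enough (Pre_), where it is exact
def pvMod2 (m : List (List Int)) (i j : Int) (f : Int → Int) : List (List Int) :=
  if 0 ≤ i ∧ 0 ≤ j then m.modify i.toNat (fun row => row.modify j.toNat f) else m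

-- the monster-killing pass, identical lines in both Pythons
def pvKill (g dead : List (List Int)) (info : List (Int × Int × Int)) (path : List (Int × Int)) :
    List (List Int) × List (List Int) × List (Int × Int × Int) :=
  info.foldl (fun st t =>
    if (t.1, t.2.1) ∈ path then
      (pvMod2 st.1 t.1 t.2.1 (fun v => v - 1), pvMod2 st.2.1 t.1 t.2.1 (fun _ => 3), st.2.2)
    else (st.1, st.2.1, st.2.2 ++ [t])) (g, dead, [])

-- A's phase 1: three nested direction loops keeping the running best (max_eat, path)
def pvBestA (ci cj : Int) (g : List (List Int)) : Int × List (Int × Int) :=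
  pvDirs.foldl (fun st1 fd =>
    let fni := ci + fd.1
    let fnj := cj + fd.2
    if ¬ pvInBox fni fnj ∨ (fni, fnj) = (ci, cj) then st1 else
    pvDirs.foldl (fun st2 sd =>
      let sni := ci + fd.1 + sd.1
      let snj := cj + fd.2 + sd.2
      if ¬ pvInBox sni snj ∨ (sni, snj) = (fni, fnj) ∨ (sni, snj) = (ci, cj) then st2 else
      pvDirs.foldl (fun st3 td =>
        let tni := ci + fd.1 + sd.1 + td.1
        let tnj := cj + fd.2 + sd.2 + td.2
        if ¬ pvInBox tni tnj ∨ (tni, tnj) = (sni, snj) ∨ (tni, tnj) = (fni, fnj) ∨ (tni, tnj) = (ci, cj) then st3 else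
        let eat := pvIdx2 g fni fnj + pvIdx2 g sni snj + pvIdx2 g tni tnj
        if st3.1 < eat then (eat, [(fni, fnj), (sni, snj), (tni, tnj)]) else st3) st2) st1)
    ((-1 : Int), ([] : List (Int × Int)))

def mv_pickman (ci : Int) (cj : Int) (gost_arr : List (List Int)) (gost_info : List (Int × Int × Int)) (dead_arr : List (List Int)) : Int × Int × List (List Int) × (List (Int × Int × Int)) × List (List Int) :=
  let st := pvBestA ci cj gost_arr
  let path := st.2
  let r := pvKill gost_arr dead_arr gost_info path
  -- path[-1]; none = IndexError on an empty path (excluded by Pre_)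
  match PySem.List.pyGet? path (-1) with
  | some p => (p.1, p.2, r.1, r.2.2, r.2.1)
  | none => (0, 0, r.1, r.2.2, r.2.1)

-- ===== PORT B =====
-- B's phase 1: DFS collecting every valid 3-step path with its eaten total (fuel = remaining depth)
def pvDfs (g : List (List Int)) (i j : Int) (seen acc : List (Int × Int)) (eaten : Int) :
    Nat → List (Int × List (Int × Int))
  | 0 => [(eaten, acc)]
  | d + 1 =>
    pvDirs.flatMap fun dd =>
      let ni := i + dd.1
      let nj := j + dd.2
      if pvInBox ni nj ∧ (ni, nj) ∉ seen then
        pvDfs g ni nj (seen ++ [(ni, nj)]) (acc ++ [(ni, nj)]) (eaten + pvIdx2 g ni nj) d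
      else []

def mv_pickman_alt (ci : Int) (cj : Int) (gost_arr : List (List Int)) (gost_info : List (Int × Int × Int)) (dead_arr : List (List Int)) : Int × Int × List (List Int) × (List (Int × Int × Int)) × List (List Int) :=
  let cands := pvDfs gost_arr ci cj [(ci, cj)] [] 0 3
  -- max(cands, key=…); none = ValueError on an empty candidate list (excluded by Pre_)
  match PySem.List.max? cands (fun c => c.1) with
  | none => (0, 0, gost_arr, gost_info, dead_arr)
  | some c =>
    let path := c.2
    let r := pvKill gost_arr dead_arr gost_info path
    match PySem.List.pyGet? path (-1) with
    | some p => (p.1, p.2, r.1, r.2.2, r.2.1)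
    | none => (0, 0, r.1, r.2.2, r.2.1)

-- ===== PRECONDITION & SPEC =====
-- Pre_ excludes the inputs where the Python A raises: gost_arr not covering the 4×4 box, no
-- self-avoiding 3-step path from (ci,cj) inside the box eating a non-negative total (A's path
-- then stays empty and path[-1] raises), and dead_arr not covering the box while a ghost sits
-- inside it; being closed-form it is slightly conservative, so it also drops some inputs on
-- which A happens to return (short rows A never reaches, short dead_arr with no ghost eaten).
def Pre_mv_pickman (ci : Int) (cj : Int) (gost_arr : List (List Int)) (gost_info : List (Int × Int × Int)) (dead_arr : List (List Int)) : Prop :=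
  4 ≤ gost_arr.length ∧ (∀ r ∈ gost_arr.take 4, 4 ≤ r.length) ∧
  ((∀ t ∈ gost_info, ¬ pvInBox t.1 t.2.1) ∨ (4 ≤ dead_arr.length ∧ ∀ r ∈ dead_arr.take 4, 4 ≤ r.length)) ∧
  ∃ d1 ∈ pvDirs, ∃ d2 ∈ pvDirs, ∃ d3 ∈ pvDirs,
    pvInBox (ci + d1.1) (cj + d1.2) ∧ (ci + d1.1, cj + d1.2) ≠ (ci, cj) ∧
    pvInBox (ci + d1.1 + d2.1) (cj + d1.2 + d2.2) ∧
    (ci + d1.1 + d2.1, cj + d1.2 + d2.2) ≠ (ci + d1.1, cj + d1.2) ∧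
    (ci + d1.1 + d2.1, cj + d1.2 + d2.2) ≠ (ci, cj) ∧
    pvInBox (ci + d1.1 + d2.1 + d3.1) (cj + d1.2 + d2.2 + d3.2) ∧
    (ci + d1.1 + d2.1 + d3.1, cj + d1.2 + d2.2 + d3.2) ≠ (ci + d1.1 + d2.1, cj + d1.2 + d2.2) ∧
    (ci + d1.1 + d2.1 + d3.1, cj + d1.2 + d2.2 + d3.2) ≠ (ci + d1.1, cj + d1.2) ∧
    (ci + d1.1 + d2.1 + d3.1, cj + d1.2 + d2.2 + d3.2) ≠ (ci, cj) ∧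
    0 ≤ pvIdx2 gost_arr (ci + d1.1) (cj + d1.2) + pvIdx2 gost_arr (ci + d1.1 + d2.1) (cj + d1.2 + d2.2) + pvIdx2 gost_arr (ci + d1.1 + d2.1 + d3.1) (cj + d1.2 + d2.2 + d3.2)
instance (ci : Int) (cj : Int) (gost_arr : List (List Int)) (gost_info : List (Int × Int × Int)) (dead_arr : List (List Int)) : Decidable (Pre_mv_pickman ci cj gost_arr gost_info dead_arr) := by unfold Pre_mv_pickman; infer_instance

def pvWitness_mv_pickman : Int × Int × List (List Int) × (List (Int × Int × Int)) × List (List Int) :=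
  (0, 0, [[0,0,0,0],[0,0,0,0],[0,0,0,0],[0,0,0,0]], [], [[0,0,0,0],[0,0,0,0],[0,0,0,0],[0,0,0,0]])

def Spec_mv_pickman (ci : Int) (cj : Int) (gost_arr : List (List Int)) (gost_info : List (Int × Int × Int)) (dead_arr : List (List Int)) (out : Int × Int × List (List Int) × (List (Int × Int × Int)) × List (List Int)) : Prop := out = mv_pickman_alt ci cj gost_arr gost_info dead_arr
instance (ci : Int) (cj : Int) (gost_arr : List (List Int)) (gost_info : List (Int × Int × Int)) (dead_arr : List (List Int)) (out : Int × Int × List (List Int) × (List (Int × Int × Int)) × List (List Int)) : Decidable (Spec_mv_pickman ci cj gost_arr gost_info dead_arr out) := by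
  unfold Spec_mv_pickman
  letI : DecidableEq (List (List Int) × List (Int × Int × Int) × List (List Int)) := fun a b => instDecidableEqProd a b
  letI : DecidableEq (Int × List (List Int) × List (Int × Int × Int) × List (List Int)) := fun a b => instDecidableEqProd a b
  exact instDecidableEqProd _ _

-- ===== CLAIM (what is proved, stated in full; the proofs are below) =====
def Claim_equal_mv_pickman : Prop := ∀ (ci : Int) (cj : Int) (gost_arr : List (List Int)) (gost_info : List (Int × Int × Int)) (dead_arr : List (List Int)), Dom_mv_pickman ci cj gost_arr gost_info dead_arr → Pre_mv_pickman ci cj gost_arr gost_info dead_arr → Spec_mv_pickman ci cj gost_arr gost_info dead_arr (mv_pickman ci cj gost_arr gost_info dead_arr)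

-- ===== LEMMAS AND PROOFS =====
-- A's running-best update, as a function (A's loop body applies exactly this to each surviving candidate)
def pvUpd (st c : Int × List (Int × Int)) : Int × List (Int × Int) := if st.1 < c.1 then c else st

-- the fold Python's max(key=…) performs (PySem.List.max? is definitionally this fold)
def pvOUpd (acc : Option (Int × List (Int × Int))) (x : Int × List (Int × Int)) :
    Option (Int × List (Int × Int)) :=
  match acc with
  | none => some x
  | some m => if m.1 < x.1 then some x else some m

-- once the optional state holds m, Python's max-fold and A's running-best fold run in lockstep
lemma pvSync (l : List (Int × List (Int × Int))) (m : Int × List (Int × Int)) :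
    l.foldl pvOUpd (some m) = some (l.foldl pvUpd m) := by
  induction l generalizing m with
  | nil => rfl
  | cons c t ih => simp only [List.foldl_cons, pvOUpd, pvUpd]; split <;> exact ih _

-- while the max-fold's current best is still ≤ b, A's fold (stuck at (b, e)) catches up at the
-- first candidate exceeding b
lemma pvLag (l : List (Int × List (Int × Int))) (m : Int × List (Int × Int)) (b : Int)
    (e : List (Int × Int)) (hm : m.1 ≤ b) (hex : ∃ x ∈ l, b < x.1) :
    l.foldl pvOUpd (some m) = some (l.foldl pvUpd (b, e)) := by
  induction l generalizing m with
  | nil => simp at hex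
  | cons c t ih =>
    simp only [List.foldl_cons, pvOUpd]
    by_cases hc : b < c.1
    · rw [if_pos (lt_of_le_of_lt hm hc), show pvUpd (b, e) c = c from if_pos hc]
      exact pvSync t c
    · rw [show pvUpd (b, e) c = (b, e) from if_neg hc]
      obtain ⟨x, hx, hbx⟩ := hex
      rcases List.mem_cons.1 hx with h | h
      · exact absurd (h ▸ hbx) hc
      · by_cases hmc : m.1 < c.1
        · rw [if_pos hmc]; exact ih c (le_of_not_gt hc) ⟨x, h, hbx⟩
        · rw [if_neg hmc]; exact ih m hm ⟨x, h, hbx⟩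

-- Python's max(key=·.1) equals A's running-best fold started at (-1, []) as soon as one
-- candidate eats ≥ 0
lemma pvMaxEq (l : List (Int × List (Int × Int))) (hex : ∃ x ∈ l, (0:Int) ≤ x.1) :
    PySem.List.max? l (fun c => c.1) = some (l.foldl pvUpd ((-1 : Int), ([] : List (Int × Int)))) := by
  have hdef : PySem.List.max? l (fun c => c.1) = l.foldl pvOUpd none := by
    unfold PySem.List.max?
    congr 1
    funext acc x
    cases acc <;> rfl
  rw [hdef]
  cases l with
  | nil => simp at hex
  | cons c t =>
    simp only [List.foldl_cons, pvOUpd]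
    obtain ⟨x, hx, hx0⟩ := hex
    by_cases hc : (-1 : Int) < c.1
    · rw [show pvUpd ((-1 : Int), ([] : List (Int × Int))) c = c from if_pos hc]
      exact pvSync t c
    · rw [show pvUpd ((-1 : Int), ([] : List (Int × Int))) c = ((-1 : Int), ([] : List (Int × Int))) from if_neg hc]
      rcases List.mem_cons.1 hx with h | h
      · exact absurd (by omega : (-1 : Int) < x.1) (h ▸ hc)
      · exact pvLag t c (-1) [] (le_of_not_gt hc) ⟨x, h, by omega⟩

-- A's three nested loops compute exactly the running-best fold over B's DFS candidate list
lemma pvBestA_eq_fold (ci cj : Int) (g : List (List Int)) :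
    pvBestA ci cj g = (pvDfs g ci cj [(ci, cj)] [] 0 3).foldl pvUpd ((-1 : Int), ([] : List (Int × Int))) := by
  unfold pvBestA
  conv_rhs => rw [pvDfs]
  rw [List.foldl_flatMap]
  apply List.foldl_ext
  intro st1 fd hfd
  dsimp only
  by_cases hc1 : ¬ pvInBox (ci + fd.1) (cj + fd.2) = true ∨ (ci + fd.1, cj + fd.2) = (ci, cj)
  · rw [if_pos hc1, if_neg (by simp only [List.mem_cons, List.not_mem_nil, or_false]; tauto)]
    rfl
  · push Not at hc1
    rw [if_neg (by tauto), if_pos (by simp only [List.mem_cons, List.not_mem_nil, or_false]; tauto)]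
    conv_rhs => rw [pvDfs]
    rw [List.foldl_flatMap]
    apply List.foldl_ext
    intro st2 sd hsd
    dsimp only
    by_cases hc2 : ¬ pvInBox (ci + fd.1 + sd.1) (cj + fd.2 + sd.2) = true ∨
        (ci + fd.1 + sd.1, cj + fd.2 + sd.2) = (ci + fd.1, cj + fd.2) ∨
        (ci + fd.1 + sd.1, cj + fd.2 + sd.2) = (ci, cj)
    · rw [if_pos hc2, if_neg (by
        simp only [List.mem_append, List.mem_cons, List.not_mem_nil, or_false]
        tauto)]
      rfl
    · push Not at hc2
      rw [if_neg (by tauto), if_pos (by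
        simp only [List.mem_append, List.mem_cons, List.not_mem_nil, or_false]
        tauto)]
      conv_rhs => rw [pvDfs]
      rw [List.foldl_flatMap]
      apply List.foldl_ext
      intro st3 td htd
      dsimp only
      by_cases hc3 : ¬ pvInBox (ci + fd.1 + sd.1 + td.1) (cj + fd.2 + sd.2 + td.2) = true ∨
          (ci + fd.1 + sd.1 + td.1, cj + fd.2 + sd.2 + td.2) = (ci + fd.1 + sd.1, cj + fd.2 + sd.2) ∨
          (ci + fd.1 + sd.1 + td.1, cj + fd.2 + sd.2 + td.2) = (ci + fd.1, cj + fd.2) ∨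
          (ci + fd.1 + sd.1 + td.1, cj + fd.2 + sd.2 + td.2) = (ci, cj)
      · rw [if_pos hc3, if_neg (by
          simp only [List.mem_append, List.mem_cons, List.not_mem_nil, or_false]
          tauto)]
        rfl
      · push Not at hc3
        rw [if_neg (by tauto)]
        conv_rhs => rw [if_pos (by
          simp only [List.mem_append, List.mem_cons, List.not_mem_nil, or_false]
          tauto), pvDfs]
        rw [List.foldl_cons, List.foldl_nil]
        have hpair : ((0 : Int) + pvIdx2 g (ci + fd.1) (cj + fd.2) + pvIdx2 g (ci + fd.1 + sd.1) (cj + fd.2 + sd.2) + pvIdx2 g (ci + fd.1 + sd.1 + td.1) (cj + fd.2 + sd.2 + td.2),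
            ([] : List (Int × Int)) ++ [(ci + fd.1, cj + fd.2)] ++ [(ci + fd.1 + sd.1, cj + fd.2 + sd.2)] ++ [(ci + fd.1 + sd.1 + td.1, cj + fd.2 + sd.2 + td.2)]) =
            ((pvIdx2 g (ci + fd.1) (cj + fd.2) + pvIdx2 g (ci + fd.1 + sd.1) (cj + fd.2 + sd.2) + pvIdx2 g (ci + fd.1 + sd.1 + td.1) (cj + fd.2 + sd.2 + td.2) : Int),
            [(ci + fd.1, cj + fd.2), (ci + fd.1 + sd.1, cj + fd.2 + sd.2), (ci + fd.1 + sd.1 + td.1, cj + fd.2 + sd.2 + td.2)]) := by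
          simp
        rw [hpair]
        rfl

-- Pre_'s witnessed path appears among B's DFS candidates with a non-negative eaten total
lemma pvCandEx (ci cj : Int) (g : List (List Int))
    (h : ∃ d1 ∈ pvDirs, ∃ d2 ∈ pvDirs, ∃ d3 ∈ pvDirs,
      pvInBox (ci + d1.1) (cj + d1.2) ∧ (ci + d1.1, cj + d1.2) ≠ (ci, cj) ∧
      pvInBox (ci + d1.1 + d2.1) (cj + d1.2 + d2.2) ∧
      (ci + d1.1 + d2.1, cj + d1.2 + d2.2) ≠ (ci + d1.1, cj + d1.2) ∧
      (ci + d1.1 + d2.1, cj + d1.2 + d2.2) ≠ (ci, cj) ∧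
      pvInBox (ci + d1.1 + d2.1 + d3.1) (cj + d1.2 + d2.2 + d3.2) ∧
      (ci + d1.1 + d2.1 + d3.1, cj + d1.2 + d2.2 + d3.2) ≠ (ci + d1.1 + d2.1, cj + d1.2 + d2.2) ∧
      (ci + d1.1 + d2.1 + d3.1, cj + d1.2 + d2.2 + d3.2) ≠ (ci + d1.1, cj + d1.2) ∧
      (ci + d1.1 + d2.1 + d3.1, cj + d1.2 + d2.2 + d3.2) ≠ (ci, cj) ∧
      0 ≤ pvIdx2 g (ci + d1.1) (cj + d1.2) + pvIdx2 g (ci + d1.1 + d2.1) (cj + d1.2 + d2.2) + pvIdx2 g (ci + d1.1 + d2.1 + d3.1) (cj + d1.2 + d2.2 + d3.2)) :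
    ∃ x ∈ pvDfs g ci cj [(ci, cj)] [] 0 3, (0:Int) ≤ x.1 := by
  obtain ⟨d1, hd1, d2, hd2, d3, hd3, hb1, hne1, hb2, hne21, hne20, hb3, hne32, hne31, hne30, hsum⟩ := h
  refine ⟨((0 : Int) + pvIdx2 g (ci + d1.1) (cj + d1.2) + pvIdx2 g (ci + d1.1 + d2.1) (cj + d1.2 + d2.2) + pvIdx2 g (ci + d1.1 + d2.1 + d3.1) (cj + d1.2 + d2.2 + d3.2),
      ([] : List (Int × Int)) ++ [(ci + d1.1, cj + d1.2)] ++ [(ci + d1.1 + d2.1, cj + d1.2 + d2.2)] ++ [(ci + d1.1 + d2.1 + d3.1, cj + d1.2 + d2.2 + d3.2)]), ?_, by dsimp only; omega⟩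
  rw [pvDfs]
  refine List.mem_flatMap.2 ⟨d1, hd1, ?_⟩
  dsimp only
  rw [if_pos ⟨hb1, by simp only [List.mem_cons, List.not_mem_nil, or_false]; exact hne1⟩]
  rw [pvDfs]
  refine List.mem_flatMap.2 ⟨d2, hd2, ?_⟩
  dsimp only
  rw [if_pos ⟨hb2, by simp only [List.mem_append, List.mem_cons, List.not_mem_nil, or_false]; tauto⟩]
  rw [pvDfs]
  refine List.mem_flatMap.2 ⟨d3, hd3, ?_⟩
  dsimp only
  rw [if_pos ⟨hb3, by simp only [List.mem_append, List.mem_cons, List.not_mem_nil, or_false]; tauto⟩]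
  rw [pvDfs]
  exact List.mem_singleton.2 rfl

-- ===== VERDICT (by name: the statement is the Claim_ definition above) =====
theorem mv_pickman_spec : Claim_equal_mv_pickman := by
  intro ci cj g info dead _ hpre
  unfold Spec_mv_pickman
  obtain ⟨_, _, _, hex⟩ := hpre
  have hmax := pvMaxEq _ (pvCandEx ci cj g hex)
  show mv_pickman ci cj g info dead = mv_pickman_alt ci cj g info dead
  unfold mv_pickman mv_pickman_alt
  dsimp only
  rw [hmax, pvBestA_eq_fold]
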